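-- pv_equiv track=rewrite | github.com/SylvainDe/aoc2020 | day24.py | one_day
-- ===== SOURCE A (Python) =====
-- import collections
--
-- def sum_elementwise(it1, it2):
--     return tuple(sum(x) for x in zip(it1, it2))
--
-- DIRECTIONS = {
--     "e": (1, 0),
--     "w": (-1, 0),
--     "se": (1, 1),
--     "sw": (0, 1),
--     "ne": (0, -1),
--     "nw": (-1, -1),
-- }
--
-- def one_day(tiles):
--     c = collections.Counter(
--         sum_elementwise(t, n) for t in tiles for n in DIRECTIONS.values()
--     )
--     return set(
--         tile
--         for tile, count in c.items()
--         if count in ((1, 2) if tile in tiles else (2,))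
--     )
-- ===== SOURCE B (Python) =====
-- def sum_elementwise(it1, it2):
--     return tuple(sum(x) for x in zip(it1, it2))
--
-- DIRECTIONS = {
--     "e": (1, 0),
--     "w": (-1, 0),
--     "se": (1, 1),
--     "sw": (0, 1),
--     "ne": (0, -1),
--     "nw": (-1, -1),
-- }
--
-- def one_day(tiles):
--     # Gather-per-cell: candidates are all neighbor cells of black tiles
--     # (first-seen order, deduped); each candidate counts its own black
--     # neighbors by O(1) lookups in a multiplicity index of the tiles.
--     candidates = list(dict.fromkeys(
--         sum_elementwise(t, n) for t in tiles for n in DIRECTIONS.values()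
--     ))
--     cnt = {}
--     for t in tiles:
--         cnt[t] = cnt.get(t, 0) + 1
--     result = set()
--     for c in candidates:
--         k = sum(cnt.get(sum_elementwise(c, n), 0) for n in DIRECTIONS.values())
--         if k == 2 or (k == 1 and c in cnt):
--             result.add(c)
--     return result
-- ===== Notes on version B (the rewrite author's own statement) =====
-- stated objective: alternative
-- what changed: Replaces A's scatter phase (accumulating a Counter over every black tile's neighbor cells, then filtering its items with a list-membership test) by a gather phase: build the deduped candidate list once plus a multiplicity index of the tiles, then each candidate counts its own black neighbors by six O(1) lookups.
import Mathlib
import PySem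

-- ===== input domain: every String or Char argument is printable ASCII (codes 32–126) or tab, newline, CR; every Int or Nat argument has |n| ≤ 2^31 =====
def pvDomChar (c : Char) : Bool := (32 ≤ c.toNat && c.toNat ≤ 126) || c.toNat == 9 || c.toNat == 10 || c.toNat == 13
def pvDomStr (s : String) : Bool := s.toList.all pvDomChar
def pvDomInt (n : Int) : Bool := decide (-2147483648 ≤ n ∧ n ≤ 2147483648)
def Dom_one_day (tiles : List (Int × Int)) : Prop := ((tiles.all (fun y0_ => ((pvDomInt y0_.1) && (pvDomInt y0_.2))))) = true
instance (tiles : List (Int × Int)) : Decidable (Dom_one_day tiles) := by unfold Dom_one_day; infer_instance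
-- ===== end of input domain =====

-- B replaces A's scatter-into-Counter accumulation by a gather-per-cell pass: the deduped
-- candidate cells each count their own black neighbors by lookups in a multiplicity index
-- of the tiles (alternative decomposition).

-- shared module context: DIRECTIONS (dict values, in insertion order) and sum_elementwise
def pvDirs : List (Int × Int) := [(1, 0), (-1, 0), (1, 1), (0, 1), (0, -1), (-1, -1)]
def pvSumEl (a b : Int × Int) : Int × Int := (a.1 + b.1, a.2 + b.2)

-- ===== PORT A =====
def one_day (tiles : List (Int × Int)) : List (Int × Int) :=
  let c := PySem.Dict.counter (tiles.flatMap (fun t => pvDirs.map (fun n => pvSumEl t n)))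
  PySem.Set.ofList ((c.items.filter (fun p =>
      if tiles.contains p.1 then p.2 == 1 || p.2 == 2 else p.2 == 2)).map (·.1))

-- ===== PORT B =====
def one_day_alt (tiles : List (Int × Int)) : List (Int × Int) :=
  let candidates := PySem.List.dedup (tiles.flatMap (fun t => pvDirs.map (fun n => pvSumEl t n)))
  let cnt := tiles.foldl (fun d t => d.insert t (d.getD t 0 + 1))
    (PySem.Dict.empty : PySem.Dict (Int × Int) Int)
  candidates.foldl (fun res c =>
    let k : Int := (pvDirs.map (fun n => cnt.getD (pvSumEl c n) 0)).sum
    if k == 2 || (k == 1 && cnt.contains c) then PySem.Set.add res c else res) []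

-- ===== PRECONDITION & SPEC =====
def Spec_one_day (tiles : List (Int × Int)) (out : List (Int × Int)) : Prop := out = one_day_alt tiles
instance (tiles : List (Int × Int)) (out : List (Int × Int)) : Decidable (Spec_one_day tiles out) := by unfold Spec_one_day; infer_instance

-- ===== CLAIM (what is proved, stated in full; the proofs are below) =====
def Claim_equal_one_day : Prop := ∀ (tiles : List (Int × Int)), Dom_one_day tiles → Spec_one_day tiles (one_day tiles)

-- ===== LEMMAS AND PROOFS =====

-- the multiplicity of c among all neighbors of the tiles equals the sum, over the six
-- (symmetric) directions, of the multiplicity of c's neighbor in tiles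
lemma count_nbrs (tiles : List (Int × Int)) (c : Int × Int) :
    ((tiles.flatMap (fun t => pvDirs.map (fun n => pvSumEl t n))).count c : Int) =
      (pvDirs.map (fun n => (tiles.count (pvSumEl c n) : Int))).sum := by
  induction tiles with
  | nil => simp [pvDirs]
  | cons t ts ih =>
    obtain ⟨t1, t2⟩ := t
    obtain ⟨c1, c2⟩ := c
    simp only [List.flatMap_cons, List.count_append, pvDirs, pvSumEl,
      List.map_cons, List.map_nil, List.sum_cons, List.sum_nil, Nat.cast_add] at ih ⊢
    rw [ih]
    simp only [List.count_cons, List.count_nil, Prod.mk.injEq, beq_iff_eq]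
    push_cast
    have h1 : (t1 + 1 = c1 ∧ t2 + 0 = c2) ↔ (t1 = c1 + -1 ∧ t2 = c2 + 0) := by omega
    have h2 : (t1 + -1 = c1 ∧ t2 + 0 = c2) ↔ (t1 = c1 + 1 ∧ t2 = c2 + 0) := by omega
    have h3 : (t1 + 1 = c1 ∧ t2 + 1 = c2) ↔ (t1 = c1 + -1 ∧ t2 = c2 + -1) := by omega
    have h4 : (t1 + 0 = c1 ∧ t2 + 1 = c2) ↔ (t1 = c1 + 0 ∧ t2 = c2 + -1) := by omega
    have h5 : (t1 + 0 = c1 ∧ t2 + -1 = c2) ↔ (t1 = c1 + 0 ∧ t2 = c2 + 1) := by omega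
    have h6 : (t1 + -1 = c1 ∧ t2 + -1 = c2) ↔ (t1 = c1 + 1 ∧ t2 = c2 + 1) := by omega
    simp only [h1, h2, h3, h4, h5, h6]
    ring

-- folding `if p c then res.add c else res` over a Nodup list of elements fresh for acc appends the filter
lemma foldl_set_add_filter (p : Int × Int → Bool) :
    ∀ (l acc : List (Int × Int)), l.Nodup → (∀ x ∈ l, x ∉ acc) →
      l.foldl (fun res c => if p c then PySem.Set.add res c else res) acc = acc ++ l.filter p := by
  intro l
  induction l with
  | nil => intro acc _ _; simp
  | cons c l ih =>
    intro acc hnd hf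
    have hc : c ∉ acc := hf c (by simp)
    have hnd' := List.nodup_cons.mp hnd
    have hadd : PySem.Set.add acc c = acc ++ [c] := by
      simp [PySem.Set.add, PySem.Set.contains, hc]
    rw [List.foldl_cons]
    rcases hp : p c with _ | _
    · rw [if_neg (by simp), List.filter_cons_of_neg (by simp [hp])]
      exact ih acc hnd'.2 (fun x hx => hf x (List.mem_cons_of_mem _ hx))
    · rw [if_pos rfl, hadd, List.filter_cons_of_pos hp,
        ih (acc ++ [c]) hnd'.2 ?_]
      · simp
      · intro x hx
        simp only [List.mem_append, List.mem_singleton]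
        rintro (h | rfl)
        · exact hf x (List.mem_cons_of_mem _ hx) h
        · exact hnd'.1 hx

-- ===== VERDICT (by name: the statement is the Claim_ definition above) =====
theorem one_day_spec : Claim_equal_one_day := by
  intro tiles _
  unfold Spec_one_day one_day one_day_alt
  simp only [PySem.Dict.items_counter, PySem.List.dedup_eq_ofList,
    PySem.Dict.foldl_insert_getD_add_one_eq_counter, PySem.Dict.getD_counter,
    PySem.Dict.contains_counter]
  rw [List.filter_map, List.map_map]
  rw [foldl_set_add_filter
        (fun c => ((pvDirs.map (fun n => ((tiles.count (pvSumEl c n) : Int)))).sum == 2 ||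
          ((pvDirs.map (fun n => ((tiles.count (pvSumEl c n) : Int)))).sum == 1 && tiles.contains c)))
        _ [] (PySem.Set.nodup_ofList _) (by simp)]
  have hmap : ((fun p : (Int × Int) × Int => p.1) ∘
      (fun k => (k, ((tiles.flatMap (fun t => pvDirs.map (fun n => pvSumEl t n))).count k : Int)))) =
      fun k => k := rfl
  rw [hmap, List.map_id']
  rw [PySem.Set.ofList_eq_self_of_nodup _ (List.Nodup.filter _ (PySem.Set.nodup_ofList _))]
  rw [List.nil_append]
  apply List.filter_congr
  intro x _
  simp only [Function.comp]
  rw [← count_nbrs]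
  rcases tiles.contains x with _ | _ <;> simp [Bool.or_comm]
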